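-- pv_equiv track=rewrite | github.com/user92085523/mydb | mydb.py | assign_args_update
-- ===== SOURCE A (Python) =====
-- def assign_args_update(columns_name, args):
--     buff = [None] * len(columns_name)
--     for i in range(len(columns_name)):
--         if '_id' in columns_name[i]:
--             continue
--         for j in range(len(args) - 1):
--             if columns_name[i] == args[j]:
--                 buff[i] = str(args[j + 1])
--     return buff
-- ===== SOURCE B (Python) =====
-- def assign_args_update(columns_name, args):
--     # Inverted nesting: index each non-'_id' column name to its list of positions once,
--     # then a single pass over consecutive arg pairs writes into the buffer
--     # (later pairs overwrite earlier writes, matching A's last-match semantics).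
--     pos = {}
--     for i in range(len(columns_name)):
--         c = columns_name[i]
--         if '_id' not in c:
--             pos.setdefault(c, []).append(i)
--     buff = [None] * len(columns_name)
--     for j in range(len(args) - 1):
--         for idx in pos.get(args[j], ()):
--             buff[idx] = str(args[j + 1])
--     return buff
-- ===== Notes on version B (the rewrite author's own statement) =====
-- stated objective: alternative
-- what changed: Inverts the control flow: one pre-pass indexes each non-'_id' column name to its list of positions, then a single pass over consecutive arg pairs writes str(args[j+1]) into all positions of args[j], replacing A's per-column rescans of args with direct writes.
import Mathlib
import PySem

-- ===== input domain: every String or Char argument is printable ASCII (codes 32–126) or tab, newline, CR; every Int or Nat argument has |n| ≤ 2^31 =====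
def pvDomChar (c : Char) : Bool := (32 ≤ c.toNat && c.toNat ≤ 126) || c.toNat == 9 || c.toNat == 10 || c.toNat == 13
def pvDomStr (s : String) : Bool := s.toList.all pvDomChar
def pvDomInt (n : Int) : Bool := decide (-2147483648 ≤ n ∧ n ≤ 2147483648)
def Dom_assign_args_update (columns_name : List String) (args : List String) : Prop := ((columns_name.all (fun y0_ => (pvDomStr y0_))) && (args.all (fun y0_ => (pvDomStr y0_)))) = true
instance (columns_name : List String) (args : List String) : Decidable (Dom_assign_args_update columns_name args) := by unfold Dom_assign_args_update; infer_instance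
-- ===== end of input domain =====

-- B inverts the control flow: index column positions once, then one pass over arg pairs writes into the buffer.

-- ===== PORT A =====
-- buff = [None]*len(columns_name); for i …: if '_id' in columns_name[i]: continue; for j …: if columns_name[i]==args[j]: buff[i] = str(args[j+1])
def assign_args_update (columns_name : List String) (args : List String) : List (Option String) :=
  let buff := List.replicate columns_name.length (none : Option String)
  (List.range columns_name.length).foldl (fun buff i =>
    if PySem.Str.isIn "_id" (columns_name.getD i "") then buff
    else (List.range (args.length - 1)).foldl (fun b j =>
      if columns_name.getD i "" = args.getD j "" then b.set i (some (args.getD (j+1) "")) else b) buff)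
    buff

-- ===== PORT B =====
-- pos = {}; for i in range(len(columns_name)): if '_id' not in c: pos.setdefault(c, []).append(i)
-- (setdefault+append ported as modify with default [], which produces the same dict)
-- buff = [None]*len; for j in range(len(args)-1): for idx in pos.get(args[j], ()): buff[idx] = str(args[j+1])
def assign_args_update_alt (columns_name : List String) (args : List String) : List (Option String) :=
  let pos := (List.range columns_name.length).foldl (fun d i =>
      let c := columns_name.getD i ""
      if PySem.Str.isIn "_id" c then d else d.modify c [] (· ++ [i]))
    (PySem.Dict.empty : PySem.Dict String (List Nat))
  let buff := List.replicate columns_name.length (none : Option String)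
  (List.range (args.length - 1)).foldl (fun b j =>
    (pos.getD (args.getD j "") []).foldl (fun b idx => b.set idx (some (args.getD (j+1) ""))) b)
    buff

-- ===== PRECONDITION & SPEC =====
def Spec_assign_args_update (columns_name : List String) (args : List String) (out : List (Option String)) : Prop := out = assign_args_update_alt columns_name args
instance (columns_name : List String) (args : List String) (out : List (Option String)) : Decidable (Spec_assign_args_update columns_name args out) := by unfold Spec_assign_args_update; infer_instance

-- ===== CLAIM (what is proved, stated in full; the proofs are below) =====
def Claim_equal_assign_args_update : Prop := ∀ (columns_name : List String) (args : List String), Dom_assign_args_update columns_name args → Spec_assign_args_update columns_name args (assign_args_update columns_name args)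

-- ===== LEMMAS AND PROOFS =====

-- value following the last occurrence of c among args[0..m-1]
def pvLastM (args : List String) (c : String) (m : Nat) : Option String :=
  (List.range m).foldl
    (fun acc j => if c = args.getD j "" then some (args.getD (j+1) "") else acc) none

-- expected entry at position k
def pvSpec (columns_name args : List String) (k : Nat) : Option String :=
  if PySem.Str.isIn "_id" (columns_name.getD k "") then none
  else pvLastM args (columns_name.getD k "") (args.length - 1)

-- ---- A-side ----

-- A's inner loop sets position i to the loop's last matching value (if any)
lemma inner_loop_eq (args : List String) (c : String) (i : Nat) (js : List Nat)
    (b : List (Option String)) :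
    js.foldl (fun b j => if c = args.getD j "" then b.set i (some (args.getD (j+1) "")) else b) b
    = match js.foldl (fun acc j => if c = args.getD j "" then some (args.getD (j+1) "") else acc)
        (none : Option String) with
      | none => b
      | some v => b.set i (some v) := by
  induction js using List.reverseRecOn generalizing b with
  | nil => simp
  | append_singleton js j ih =>
    simp only [List.foldl_append, List.foldl_cons, List.foldl_nil]
    by_cases h : c = args.getD j ""
    · simp only [if_pos h, ih]
      cases js.foldl (fun acc j => if c = args.getD j "" then some (args.getD (j+1) "") else acc)
          (none : Option String) with
      | none => rfl
      | some v => simp [List.set_set]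
    · simp only [if_neg h, ih]

-- A's outer loop invariant
lemma outer_loop_inv (columns_name args : List String) (m : Nat)
    (hm : m ≤ columns_name.length) :
    let r := (List.range m).foldl (fun buff i =>
      if PySem.Str.isIn "_id" (columns_name.getD i "") then buff
      else (List.range (args.length - 1)).foldl (fun b j =>
        if columns_name.getD i "" = args.getD j "" then b.set i (some (args.getD (j+1) "")) else b) buff)
      (List.replicate columns_name.length (none : Option String))
    r.length = columns_name.length ∧
      ∀ k, k < columns_name.length →
        r.getD k none = if k < m then pvSpec columns_name args k else none := by
  induction m with
  | zero => simp
  | succ m ih =>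
    obtain ⟨hlen, hval⟩ := ih (Nat.le_of_succ_le hm)
    simp only [List.range_succ, List.foldl_append, List.foldl_cons, List.foldl_nil]
    set r := (List.range m).foldl (fun buff i =>
      if PySem.Str.isIn "_id" (columns_name.getD i "") then buff
      else (List.range (args.length - 1)).foldl (fun b j =>
        if columns_name.getD i "" = args.getD j "" then b.set i (some (args.getD (j+1) "")) else b) buff)
      (List.replicate columns_name.length (none : Option String)) with hr
    have hmn : m < columns_name.length := hm
    by_cases hid : PySem.Str.isIn "_id" (columns_name.getD m "")
    · have hspec : pvSpec columns_name args m = none := by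
        unfold pvSpec; rw [if_pos hid]
      rw [if_pos hid]
      refine ⟨hlen, fun k hk => ?_⟩
      rw [hval k hk]
      rcases Nat.lt_trichotomy k m with hkm | hke | hkm
      · rw [if_pos hkm, if_pos (Nat.lt_succ_of_lt hkm)]
      · subst hke
        rw [if_neg (Nat.lt_irrefl k), if_pos (Nat.lt_succ_self k), hspec]
      · rw [if_neg (by omega), if_neg (by omega)]
    · rw [if_neg hid, inner_loop_eq]
      cases hL : (List.range (args.length - 1)).foldl
          (fun acc j => if columns_name.getD m "" = args.getD j "" then
            some (args.getD (j+1) "") else acc) (none : Option String) with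
      | none =>
        dsimp only
        have hspec : pvSpec columns_name args m = none := by
          unfold pvSpec pvLastM; rw [if_neg hid]; exact hL
        refine ⟨hlen, fun k hk => ?_⟩
        rw [hval k hk]
        rcases Nat.lt_trichotomy k m with hkm | hke | hkm
        · rw [if_pos hkm, if_pos (Nat.lt_succ_of_lt hkm)]
        · subst hke
          rw [if_neg (Nat.lt_irrefl k), if_pos (Nat.lt_succ_self k), hspec]
        · rw [if_neg (by omega), if_neg (by omega)]
      | some v =>
        dsimp only
        have hspec : pvSpec columns_name args m = some v := by
          unfold pvSpec pvLastM; rw [if_neg hid]; exact hL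
        have hlen' : (r.set m (some v)).length = columns_name.length := by
          rw [List.length_set]; exact hlen
        refine ⟨hlen', fun k hk => ?_⟩
        rcases Nat.lt_trichotomy k m with hkm | hke | hkm
        · rw [List.getD_eq_getElem _ _ (by omega), List.getElem_set_ne (by omega),
              ← List.getD_eq_getElem _ _ (by omega), hval k hk,
              if_pos hkm, if_pos (Nat.lt_succ_of_lt hkm)]
        · subst hke
          rw [List.getD_eq_getElem _ _ (by omega), List.getElem_set_self (h := by omega),
              if_pos (Nat.lt_succ_self k), hspec]
        · rw [List.getD_eq_getElem _ _ (by omega), List.getElem_set_ne (by omega),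
              ← List.getD_eq_getElem _ _ (by omega), hval k hk,
              if_neg (by omega), if_neg (by omega)]

-- ---- B-side ----

-- the position index: pos[c] = positions of c among columns_name (absent/[] for '_id' names)
lemma pos_getD (columns_name : List String) (c : String) (m : Nat) :
    (((List.range m).foldl (fun d i =>
        let ci := columns_name.getD i ""
        if PySem.Str.isIn "_id" ci then d else d.modify ci [] (· ++ [i]))
      (PySem.Dict.empty : PySem.Dict String (List Nat))).getD c [])
    = if PySem.Str.isIn "_id" c then []
      else (List.range m).filter (fun k => columns_name.getD k "" == c) := by
  induction m with
  | zero => simp [PySem.Dict.getD_empty]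
  | succ m ih =>
    simp only [List.range_succ, List.foldl_append, List.foldl_cons, List.foldl_nil,
      List.filter_append, List.filter_cons, List.filter_nil]
    by_cases hid : PySem.Str.isIn "_id" (columns_name.getD m "")
    · rw [if_pos hid, ih]
      by_cases hc : PySem.Str.isIn "_id" c
      · rw [if_pos hc, if_pos hc]
      · rw [if_neg hc, if_neg hc]
        have hne : ¬ columns_name[m]?.getD "" = c := fun h => hc (by
          have hid' : PySem.Str.isIn "_id" (columns_name[m]?.getD "") = true := hid
          exact h ▸ hid')
        simp [hne]
    · rw [if_neg hid, PySem.Dict.getD_modify]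
      by_cases hc : c = columns_name.getD m ""
      · subst hc
        rw [if_pos rfl, ih, if_neg hid, if_neg hid]
        simp
      · rw [if_neg hc, ih]
        by_cases hcc : PySem.Str.isIn "_id" c
        · rw [if_pos hcc, if_pos hcc]
        · rw [if_neg hcc, if_neg hcc]
          have hne : ¬ columns_name[m]?.getD "" = c := fun h => hc (by
            have h' : columns_name.getD m "" = c := h
            exact h'.symm)
          simp [hne]

-- writing the same value at every index of L
lemma foldl_set_length (L : List Nat) (v : Option String) (b : List (Option String)) :
    (L.foldl (fun b idx => b.set idx v) b).length = b.length := by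
  induction L generalizing b with
  | nil => rfl
  | cons i L ih => simp [List.foldl_cons, ih]

lemma foldl_set_getD (L : List Nat) (v : Option String) (b : List (Option String)) (k : Nat) :
    (L.foldl (fun b idx => b.set idx v) b).getD k none
    = if k ∈ L ∧ k < b.length then v else b.getD k none := by
  induction L generalizing b with
  | nil => simp
  | cons i L ih =>
    simp only [List.foldl_cons]
    rw [ih, List.length_set]
    by_cases hL : k ∈ L ∧ k < b.length
    · rw [if_pos hL, if_pos ⟨List.mem_cons_of_mem _ hL.1, hL.2⟩]
    · rw [if_neg hL]
      by_cases hik : k = i ∧ k < b.length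
      · obtain ⟨hik, hkb⟩ := hik
        subst hik
        rw [List.getD_eq_getElem _ _ (by simpa using hkb), List.getElem_set_self (h := by simpa using hkb),
          if_pos ⟨List.mem_cons_self, hkb⟩]
      · have hne : ¬ (k ∈ i :: L ∧ k < b.length) := by
          intro ⟨hm, hb⟩
          rcases List.mem_cons.mp hm with h | h
          · exact hik ⟨h, hb⟩
          · exact hL ⟨h, hb⟩
        rw [if_neg hne]
        by_cases hkb : k < b.length
        · have hki : k ≠ i := fun h => hik ⟨h, hkb⟩
          rw [List.getD_eq_getElem _ _ (by simpa using hkb), List.getElem_set_ne (by omega),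
            ← List.getD_eq_getElem _ _ hkb]
        · rw [List.getD_eq_default _ _ (by simpa using Nat.le_of_not_lt hkb),
            List.getD_eq_default _ _ (Nat.le_of_not_lt hkb)]

-- B's write loop invariant: after m arg pairs, position k holds the last match among them
lemma alt_loop_inv (columns_name args : List String) (m : Nat) :
    let pos := (List.range columns_name.length).foldl (fun d i =>
        let c := columns_name.getD i ""
        if PySem.Str.isIn "_id" c then d else d.modify c [] (· ++ [i]))
      (PySem.Dict.empty : PySem.Dict String (List Nat))
    let r := (List.range m).foldl (fun b j =>
      (pos.getD (args.getD j "") []).foldl (fun b idx => b.set idx (some (args.getD (j+1) ""))) b)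
      (List.replicate columns_name.length (none : Option String))
    r.length = columns_name.length ∧
      ∀ k, k < columns_name.length →
        r.getD k none = if PySem.Str.isIn "_id" (columns_name.getD k "") then none
          else pvLastM args (columns_name.getD k "") m := by
  induction m with
  | zero =>
    refine ⟨by simp, fun k hk => ?_⟩
    simp [pvLastM]
  | succ m ih =>
    obtain ⟨hlen, hval⟩ := ih
    simp only [List.range_succ, List.foldl_append, List.foldl_cons, List.foldl_nil] at *
    constructor
    · rw [foldl_set_length]; exact hlen
    · intro k hk
      rw [foldl_set_getD, pos_getD, hlen]
      have hlast : pvLastM args (columns_name.getD k "") (m+1)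
          = if columns_name.getD k "" = args.getD m ""
            then some (args.getD (m+1) "") else pvLastM args (columns_name.getD k "") m := by
        unfold pvLastM
        rw [List.range_succ, List.foldl_append, List.foldl_cons, List.foldl_nil]
      by_cases hid : PySem.Str.isIn "_id" (columns_name.getD k "")
      · rw [if_pos hid] at *
        have hnm : ¬ (k ∈ (if PySem.Str.isIn "_id" (args.getD m "") then []
            else (List.range columns_name.length).filter
              (fun k' => columns_name.getD k' "" == args.getD m "")) ∧ k < columns_name.length) := by
          intro ⟨hm', _⟩
          by_cases ha : PySem.Str.isIn "_id" (args.getD m "")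
          · rw [if_pos ha] at hm'; exact absurd hm' (List.not_mem_nil)
          · rw [if_neg ha] at hm'
            have := (List.mem_filter.mp hm').2
            exact ha (by rwa [(beq_iff_eq).mp this] at hid)
        rw [if_neg hnm, hval k hk, if_pos hid]
      · rw [if_neg hid] at *
        rw [hlast]
        by_cases hce : columns_name.getD k "" = args.getD m ""
        · have hna : ¬ PySem.Str.isIn "_id" (args.getD m "") := by rwa [← hce]
          have hmem : k ∈ (if PySem.Str.isIn "_id" (args.getD m "") then []
              else (List.range columns_name.length).filter
                (fun k' => columns_name.getD k' "" == args.getD m "")) := by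
            rw [if_neg hna]
            exact List.mem_filter.mpr ⟨List.mem_range.mpr hk, by simpa using hce⟩
          rw [if_pos ⟨hmem, hk⟩, if_pos hce]
        · have hnm : ¬ (k ∈ (if PySem.Str.isIn "_id" (args.getD m "") then []
              else (List.range columns_name.length).filter
                (fun k' => columns_name.getD k' "" == args.getD m "")) ∧ k < columns_name.length) := by
            intro ⟨hm', _⟩
            by_cases ha : PySem.Str.isIn "_id" (args.getD m "")
            · rw [if_pos ha] at hm'; exact absurd hm' (List.not_mem_nil)
            · rw [if_neg ha] at hm'
              exact hce ((beq_iff_eq).mp (List.mem_filter.mp hm').2)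
          rw [if_neg hnm, if_neg hce, hval k hk, if_neg hid]

-- ===== VERDICT (by name: the statement is the Claim_ definition above) =====
theorem assign_args_update_spec : Claim_equal_assign_args_update := by
  intro columns_name args _
  unfold Spec_assign_args_update
  obtain ⟨hlenA, hvalA⟩ := outer_loop_inv columns_name args columns_name.length le_rfl
  obtain ⟨hlenB, hvalB⟩ := alt_loop_inv columns_name args (args.length - 1)
  have hA : assign_args_update columns_name args
      = (List.range columns_name.length).foldl (fun buff i =>
        if PySem.Str.isIn "_id" (columns_name.getD i "") then buff
        else (List.range (args.length - 1)).foldl (fun b j =>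
          if columns_name.getD i "" = args.getD j "" then b.set i (some (args.getD (j+1) "")) else b) buff)
      (List.replicate columns_name.length (none : Option String)) := rfl
  have hB : assign_args_update_alt columns_name args
      = (List.range (args.length - 1)).foldl (fun b j =>
        (((List.range columns_name.length).foldl (fun d i =>
            let c := columns_name.getD i ""
            if PySem.Str.isIn "_id" c then d else d.modify c [] (· ++ [i]))
          (PySem.Dict.empty : PySem.Dict String (List Nat))).getD (args.getD j "") []).foldl
          (fun b idx => b.set idx (some (args.getD (j+1) ""))) b)
      (List.replicate columns_name.length (none : Option String)) := rfl
  apply List.ext_getElem (by rw [hA, hB, hlenA, hlenB])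
  intro k hk hk'
  have hkc : k < columns_name.length := by rw [hA, hlenA] at hk; exact hk
  have h1 : (assign_args_update columns_name args).getD k none = pvSpec columns_name args k := by
    rw [hA, hvalA k hkc, if_pos hkc]
  have h2 : (assign_args_update_alt columns_name args).getD k none = pvSpec columns_name args k := by
    rw [hB, hvalB k hkc]; rfl
  rw [List.getD_eq_getElem _ _ hk] at h1
  rw [List.getD_eq_getElem _ _ hk'] at h2
  rw [h1, h2]
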